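-- pv_equiv track=rewrite | github.com/banana-galaxy/challenges | challenge8(theater_escape)/SilverShade.py | whichExit
-- ===== SOURCE A (Python) =====
-- def whichExit(theatre):
--     # Get my Row and Seat
--     for row in theatre:
--         if 0 in row:
--             myrow = row
--             myseat = row.index(0)
--             break
--
--     # Get people sitting/unoccupied on the left hand side
--     leftside = []
--     for person in myrow:
--         if person != 0:
--             leftside.append(person)
--         else:
--             break
--
--     # Get people sitting/unoccupied on the right hand side
--     rightside = []
--     for person in myrow[myseat + 1:]:
--         rightside.append(person)
--
--     # returns output based on the number of people sitting on either sides
--     if leftside.count(1) > rightside.count(1):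
--         return 'right'
--     elif leftside.count(1) < rightside.count(1):
--         return 'left'
--     else:
--         return 'same'
-- ===== SOURCE B (Python) =====
-- def whichExit(theatre):
--     # find the row containing my (empty) seat
--     for row in theatre:
--         if 0 in row:
--             myrow = row
--             break
--
--     # one pass: count occupied seats (1s) before and after the first 0
--     left = 0
--     right = 0
--     seen_zero = False
--     for v in myrow:
--         if v == 0 and not seen_zero:
--             seen_zero = True
--         elif v == 1:
--             if seen_zero:
--                 right += 1
--             else:
--                 left += 1
--
--     if left > right:
--         return 'right'
--     if left < right:
--         return 'left'
--     return 'same'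
-- ===== Notes on version B (the rewrite author's own statement) =====
-- stated objective: simpler
-- what changed: B replaces A's three list builds (left prefix list, sliced right list, two .count(1) scans) with one pass over the pivot row keeping two counters and a seen-zero flag.
import Mathlib
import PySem

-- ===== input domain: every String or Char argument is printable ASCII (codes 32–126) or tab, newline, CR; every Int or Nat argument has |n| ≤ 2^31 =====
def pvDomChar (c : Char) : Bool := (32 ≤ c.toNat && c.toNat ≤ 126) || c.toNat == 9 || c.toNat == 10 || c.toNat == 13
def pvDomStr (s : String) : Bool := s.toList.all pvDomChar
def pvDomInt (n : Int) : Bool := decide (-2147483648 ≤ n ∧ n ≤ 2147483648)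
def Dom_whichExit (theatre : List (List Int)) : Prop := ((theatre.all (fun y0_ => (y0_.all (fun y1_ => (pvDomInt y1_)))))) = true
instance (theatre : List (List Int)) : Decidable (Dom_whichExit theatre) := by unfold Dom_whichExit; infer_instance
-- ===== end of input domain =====

-- B replaces A's three list builds and two .count(1) scans with one pass over the
-- pivot row keeping two counters and a seen-zero flag (objective: simpler).

-- ===== PORT A =====
-- outer loop: first row containing 0 (none = Python NameError, excluded by Pre_)
def pvFindRowA : List (List Int) → Option (List Int)
  | [] => none
  | r :: rs => if (0 : Int) ∈ r then some r else pvFindRowA rs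

-- left-side loop: append until the first 0
def pvLeftA : List Int → List Int
  | [] => []
  | p :: ps => if p ≠ 0 then p :: pvLeftA ps else []

def whichExit (theatre : List (List Int)) : String :=
  match pvFindRowA theatre with
  | none => ""   -- Python raises NameError here; excluded by Pre_
  | some myrow =>
    let myseat : Int := (((PySem.List.index? myrow 0).getD 0 : Nat) : Int)
    let leftside := pvLeftA myrow
    let rightside := PySem.List.slice myrow (some (myseat + 1)) none
    if PySem.List.count leftside 1 > PySem.List.count rightside 1 then "right"
    else if PySem.List.count leftside 1 < PySem.List.count rightside 1 then "left"
    else "same"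

-- ===== PORT B =====
def pvFindRowB : List (List Int) → Option (List Int)
  | [] => none
  | r :: rs => if (0 : Int) ∈ r then some r else pvFindRowB rs

-- single pass: (left, right) counters with a seen-zero flag
def pvScanB : List Int → Bool → Int → Int → Int × Int
  | [], _, l, r => (l, r)
  | v :: vs, seen, l, r =>
    if v = 0 ∧ seen = false then pvScanB vs true l r
    else if v = 1 then
      (if seen then pvScanB vs seen l (r + 1) else pvScanB vs seen (l + 1) r)
    else pvScanB vs seen l r

def whichExit_alt (theatre : List (List Int)) : String :=
  match pvFindRowB theatre with
  | none => ""   -- Python raises NameError here; excluded by Pre_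
  | some myrow =>
    let lr := pvScanB myrow false 0 0
    if lr.1 > lr.2 then "right"
    else if lr.1 < lr.2 then "left"
    else "same"

-- ===== PRECONDITION & SPEC =====
-- Pre_ excludes inputs with no 0 anywhere: there Python A raises NameError (myrow unbound).
def Pre_whichExit (theatre : List (List Int)) : Prop := ∃ r ∈ theatre, (0 : Int) ∈ r
instance (theatre : List (List Int)) : Decidable (Pre_whichExit theatre) := by unfold Pre_whichExit; infer_instance
def pvWitness_whichExit : List (List Int) := [[1, 1], [1, 0, 1]]
def Spec_whichExit (theatre : List (List Int)) (out : String) : Prop := out = whichExit_alt theatre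
instance (theatre : List (List Int)) (out : String) : Decidable (Spec_whichExit theatre out) := by unfold Spec_whichExit; infer_instance

-- ===== CLAIM (what is proved, stated in full; the proofs are below) =====
def Claim_equal_whichExit : Prop := ∀ (theatre : List (List Int)), Dom_whichExit theatre → Pre_whichExit theatre → Spec_whichExit theatre (whichExit theatre)

-- ===== LEMMAS AND PROOFS =====
-- elements strictly after the first 0
def pvAfter : List Int → List Int
  | [] => []
  | x :: xs => if x = 0 then xs else pvAfter xs

theorem pvFindRowB_eq (t : List (List Int)) : pvFindRowB t = pvFindRowA t := by
  induction t with
  | nil => rfl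
  | cons r rs ih => simp [pvFindRowA, pvFindRowB, ih]

theorem pvFindRowA_mem (t : List (List Int)) (h : ∃ r ∈ t, (0 : Int) ∈ r) :
    ∃ r, pvFindRowA t = some r ∧ (0 : Int) ∈ r := by
  induction t with
  | nil => simp at h
  | cons x xs ih =>
    by_cases hx : (0 : Int) ∈ x
    · exact ⟨x, by simp [pvFindRowA, hx], hx⟩
    · obtain ⟨r, hr, h0⟩ := h
      rcases List.mem_cons.mp hr with hr | hr
      · exact absurd (hr ▸ h0) hx
      · obtain ⟨r', hfind, h0'⟩ := ih ⟨r, hr, h0⟩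
        exact ⟨r', by simp [pvFindRowA, hx, hfind], h0'⟩

theorem index?_eq_left_len (r : List Int) (h : (0 : Int) ∈ r) :
    PySem.List.index? r 0 = some (pvLeftA r).length := by
  induction r with
  | nil => simp at h
  | cons x xs ih =>
    by_cases hx : x = 0
    · subst hx
      rw [PySem.List.index?_cons_self]
      simp [pvLeftA]
    · have hmem : (0 : Int) ∈ xs := by
        rcases List.mem_cons.mp h with h | h
        · exact absurd h.symm hx
        · exact h
      rw [PySem.List.index?_cons_of_ne _ hx, ih hmem]
      simp [pvLeftA, hx]

theorem drop_eq_pvAfter (r : List Int) (h : (0 : Int) ∈ r) :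
    r.drop ((pvLeftA r).length + 1) = pvAfter r := by
  induction r with
  | nil => simp at h
  | cons x xs ih =>
    by_cases hx : x = 0
    · subst hx; simp [pvLeftA, pvAfter]
    · have hmem : (0 : Int) ∈ xs := by
        rcases List.mem_cons.mp h with h | h
        · exact absurd h.symm hx
        · exact h
      simp only [pvLeftA, hx, ne_eq, not_false_eq_true, if_true, pvAfter,
        List.length_cons]
      simpa using ih hmem

theorem pvScanB_true (l : List Int) (a b : Int) :
    pvScanB l true a b = (a, b + (l.count 1 : Int)) := by
  induction l generalizing b with
  | nil => simp [pvScanB]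
  | cons v vs ih =>
    by_cases hv : v = 1
    · subst hv; simp [pvScanB, ih]; ring
    · simp [pvScanB, hv, ih]

theorem pvScanB_false (l : List Int) (a b : Int) (h : (0 : Int) ∈ l) :
    pvScanB l false a b = (a + ((pvLeftA l).count 1 : Int), b + ((pvAfter l).count 1 : Int)) := by
  induction l generalizing a with
  | nil => simp at h
  | cons v vs ih =>
    by_cases hv : v = 0
    · subst hv
      simp [pvScanB, pvScanB_true, pvLeftA, pvAfter]
    · have hmem : (0 : Int) ∈ vs := by
        rcases List.mem_cons.mp h with h | h
        · exact absurd h.symm hv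
        · exact h
      by_cases h1 : v = 1
      · subst h1
        simp [pvScanB, ih _ hmem, pvLeftA, pvAfter]; ring
      · simp [pvScanB, hv, h1, ih _ hmem, pvLeftA, pvAfter]

-- ===== VERDICT (by name: the statement is the Claim_ definition above) =====
theorem whichExit_spec : Claim_equal_whichExit := by
  intro theatre _ hpre
  unfold Spec_whichExit whichExit whichExit_alt
  obtain ⟨r, hfind, h0⟩ := pvFindRowA_mem theatre hpre
  rw [pvFindRowB_eq, hfind]
  simp only
  rw [index?_eq_left_len r h0]
  have hslice : PySem.List.slice r (some ((((pvLeftA r).length : Nat) : Int) + 1)) none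
      = r.drop ((pvLeftA r).length + 1) := by
    have := PySem.List.slice_from_natCast (xs := r) (a := (pvLeftA r).length + 1)
    simpa using this
  rw [pvScanB_false r 0 0 h0]
  simp only [Option.getD_some, hslice, drop_eq_pvAfter r h0, PySem.List.count_eq, zero_add]
  by_cases hgt : (pvAfter r).count 1 < (pvLeftA r).count 1
  · simp [hgt, show ((pvAfter r).count 1 : Int) < ((pvLeftA r).count 1 : Int) by exact_mod_cast hgt]
  · by_cases hlt : (pvLeftA r).count 1 < (pvAfter r).count 1
    · have : ((pvLeftA r).count 1 : Int) < ((pvAfter r).count 1 : Int) := by exact_mod_cast hlt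
      simp [hgt, hlt, this, not_lt.mpr (le_of_lt this)]
    · have heq : (pvLeftA r).count 1 = (pvAfter r).count 1 := le_antisymm (not_lt.1 hgt) (not_lt.1 hlt)
      simp [heq]
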